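-- pv_equiv track=rewrite | github.com/AngheloAlf/otakuinador | otakuinador/hiragana.py | replace_punctuations
-- ===== SOURCE A (Python) =====
-- def replace_punctuations(sentence: str) -> str:
--     sentence = sentence.replace("{", "｛")
--     sentence = sentence.replace("}", "｝")
--     sentence = sentence.replace("(", "（")
--     sentence = sentence.replace(")", "）")
--     sentence = sentence.replace("[", "［")
--     sentence = sentence.replace("]", "］")
--     # sentence = sentence.replace("[", "【")
--     # sentence = sentence.replace("]", "】")
--     sentence = sentence.replace(",", "、")
--     sentence = sentence.replace("...", "…")
--     sentence = sentence.replace("..", "‥")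
--     sentence = sentence.replace(".", "。")
--     sentence = sentence.replace(" ", "　")
--     sentence = sentence.replace("~", "〜")
--     sentence = sentence.replace(":", "：")
--     sentence = sentence.replace("!", "！")
--     sentence = sentence.replace("?", "？")
--
--     sentence_list = list(sentence)
--     i = 0
--     single = True
--     double = True
--     while i < len(sentence_list):
--         if sentence_list[i] == "'":
--             if single:
--                 sentence_list[i] = "「"
--             else:
--                 sentence_list[i] = "」"
--             single = not single
--         elif sentence_list[i] == '"':
--             if double:
--                 sentence_list[i] = "『"
--             else:
--                 sentence_list[i] = "』"
--             double = not double
--         i += 1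
--     sentence = "".join(sentence_list)
--     return sentence
-- ===== SOURCE B (Python) =====
-- _TABLE = {
--     "{": "｛", "}": "｝", "(": "（", ")": "）", "[": "［", "]": "］",
--     ",": "、", " ": "　", "~": "〜", ":": "：", "!": "！", "?": "？",
-- }
--
--
-- def replace_punctuations(sentence: str) -> str:
--     out = []
--     i = 0
--     n = len(sentence)
--     single = True
--     double = True
--     while i < n:
--         c = sentence[i]
--         if sentence[i:i + 3] == "...":
--             out.append("…")
--             i += 3
--         elif sentence[i:i + 2] == "..":
--             out.append("‥")
--             i += 2
--         elif c == ".":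
--             out.append("。")
--             i += 1
--         elif c == "'":
--             out.append("「" if single else "」")
--             single = not single
--             i += 1
--         elif c == '"':
--             out.append("『" if double else "』")
--             double = not double
--             i += 1
--         else:
--             out.append(_TABLE.get(c, c))
--             i += 1
--     return "".join(out)
-- ===== Notes on version B (the rewrite author's own statement) =====
-- stated objective: alternative
-- what changed: B replaces A's ~16 separate str.replace scans plus a final quote-toggling pass by a single greedy left-to-right pass that matches three-, two- and one-dot runs greedily by precedence, toggles the quote flags, and looks single-char substitutions up in one dict.
import Mathlib
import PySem

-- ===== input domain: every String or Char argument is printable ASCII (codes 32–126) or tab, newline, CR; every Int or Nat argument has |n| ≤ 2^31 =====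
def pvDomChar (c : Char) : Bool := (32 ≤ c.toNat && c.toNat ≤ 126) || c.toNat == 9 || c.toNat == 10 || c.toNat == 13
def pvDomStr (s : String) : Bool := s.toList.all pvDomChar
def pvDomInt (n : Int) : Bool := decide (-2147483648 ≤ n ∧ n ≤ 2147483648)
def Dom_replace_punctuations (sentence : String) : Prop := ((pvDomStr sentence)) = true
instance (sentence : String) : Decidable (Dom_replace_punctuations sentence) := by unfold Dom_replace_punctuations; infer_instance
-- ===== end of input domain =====

-- B replaces A's ~16 full scans (one str.replace per mark plus a quote-toggling pass) by one
-- greedy left-to-right pass (longest dot run first) with a single-char substitution table.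

-- ===== PORT A =====
-- the while loop over sentence_list with index i: each step rewrites the i-th char (quote
-- toggling) and moves on, so it is transliterated as a structural pass carrying (single, double)
def pvALoop : Bool → Bool → List Char → List Char
  | _, _, [] => []
  | single, double, c :: t =>
    if c = '\'' then (if single then '「' else '」') :: pvALoop (!single) double t
    else if c = '"' then (if double then '『' else '』') :: pvALoop single (!double) t
    else c :: pvALoop single double t

def replace_punctuations (sentence : String) : String :=
  let s1 := PySem.Str.replace sentence "{" "｛"
  let s2 := PySem.Str.replace s1 "}" "｝"
  let s3 := PySem.Str.replace s2 "(" "（"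
  let s4 := PySem.Str.replace s3 ")" "）"
  let s5 := PySem.Str.replace s4 "[" "［"
  let s6 := PySem.Str.replace s5 "]" "］"
  let s7 := PySem.Str.replace s6 "," "、"
  let s8 := PySem.Str.replace s7 "..." "…"
  let s9 := PySem.Str.replace s8 ".." "‥"
  let s10 := PySem.Str.replace s9 "." "。"
  let s11 := PySem.Str.replace s10 " " "　"
  let s12 := PySem.Str.replace s11 "~" "〜"
  let s13 := PySem.Str.replace s12 ":" "："
  let s14 := PySem.Str.replace s13 "!" "！"
  let s15 := PySem.Str.replace s14 "?" "？"
  -- list(sentence) is a list of the characters; "".join(sentence_list) re-assembles them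
  String.ofList (pvALoop true true s15.toList)

-- ===== PORT B =====
def pvTable : List (Char × Char) :=
  [('{', '｛'), ('}', '｝'), ('(', '（'), (')', '）'), ('[', '［'), (']', '］'),
   (',', '、'), (' ', '　'), ('~', '〜'), (':', '：'), ('!', '！'), ('?', '？')]

-- _TABLE.get(c, c): first-match lookup in the literal dict (keys are distinct)
def pvLookup (c : Char) : Char := ((pvTable.find? (fun p => c == p.1)).map Prod.snd).getD c

-- the while loop of Source B: sentence[i:i+3] == "..." etc. become take/drop on the remaining list
def pvBLoop (single double : Bool) (l : List Char) : List Char :=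
  match l with
  | [] => []
  | c :: rest =>
    if c = '.' ∧ rest.take 2 = ['.', '.'] then '…' :: pvBLoop single double (rest.drop 2)
    else if c = '.' ∧ rest.take 1 = ['.'] then '‥' :: pvBLoop single double (rest.drop 1)
    else if c = '.' then '。' :: pvBLoop single double rest
    else if c = '\'' then (if single then '「' else '」') :: pvBLoop (!single) double rest
    else if c = '"' then (if double then '『' else '』') :: pvBLoop single (!double) rest
    else pvLookup c :: pvBLoop single double rest
termination_by l.length
decreasing_by all_goals (simp [List.length_drop]; try omega)

def replace_punctuations_alt (sentence : String) : String :=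
  String.ofList (pvBLoop true true sentence.toList)

-- ===== PRECONDITION & SPEC =====
def Spec_replace_punctuations (sentence : String) (out : String) : Prop := out = replace_punctuations_alt sentence
instance (sentence : String) (out : String) : Decidable (Spec_replace_punctuations sentence out) := by unfold Spec_replace_punctuations; infer_instance

-- ===== CLAIM (what is proved, stated in full; the proofs are below) =====
def Claim_equal_replace_punctuations : Prop := ∀ (sentence : String), Dom_replace_punctuations sentence → Spec_replace_punctuations sentence (replace_punctuations sentence)

-- ===== LEMMAS AND PROOFS =====

theorem pvGoAcc (old new : List Char) : ∀ (fuel : Nat) (l acc : List Char),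
    PySem.Chars.replace.go old new fuel l acc = acc.reverse ++ PySem.Chars.replace.go old new fuel l [] := by
  intro fuel
  induction fuel with
  | zero => intro l acc; simp [PySem.Chars.replace.go]
  | succ f ih =>
    intro l acc
    cases l with
    | nil => simp [PySem.Chars.replace.go]
    | cons c t =>
      by_cases h : old.isPrefixOf (c :: t)
      · simp only [PySem.Chars.replace.go, h, if_pos]
        rw [ih _ (new.reverse ++ acc), ih _ (new.reverse ++ [])]
        simp
      · simp only [PySem.Chars.replace.go, h, if_neg, if_false, Bool.false_eq_true]
        rw [ih _ (c :: acc), ih _ [c]]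
        simp

theorem pvGoFuelSucc (old new : List Char) (hold : old ≠ []) : ∀ (fuel : Nat) (l : List Char),
    l.length ≤ fuel →
    PySem.Chars.replace.go old new (fuel + 1) l [] = PySem.Chars.replace.go old new fuel l [] := by
  intro fuel
  induction fuel with
  | zero =>
    intro l hl
    have : l = [] := List.length_eq_zero_iff.mp (Nat.le_zero.mp hl)
    subst this
    simp [PySem.Chars.replace.go]
  | succ f ih =>
    intro l hl
    cases l with
    | nil => simp [PySem.Chars.replace.go]
    | cons c t =>
      have hlen : 1 ≤ old.length := by
        cases old with
        | nil => exact absurd rfl hold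
        | cons a b => simp
      by_cases h : old.isPrefixOf (c :: t)
      · simp only [PySem.Chars.replace.go, h, if_pos]
        rw [pvGoAcc, pvGoAcc old new f]
        rw [ih (List.drop old.length (c :: t)) (by simp at hl ⊢; omega)]
      · simp only [PySem.Chars.replace.go, h, if_neg, if_false, Bool.false_eq_true]
        rw [pvGoAcc, pvGoAcc old new f]
        rw [ih t (by simp at hl; omega)]

theorem pvGoFuelGe (old new : List Char) (hold : old ≠ []) : ∀ (fuel : Nat) (l : List Char),
    l.length ≤ fuel →
    PySem.Chars.replace.go old new fuel l [] = PySem.Chars.replace l old new := by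
  intro fuel
  induction fuel with
  | zero =>
    intro l hl
    have : l = [] := List.length_eq_zero_iff.mp (Nat.le_zero.mp hl)
    subst this
    simp [PySem.Chars.replace, PySem.Chars.replace.go, List.isEmpty_iff, hold]
  | succ f ih =>
    intro l hl
    by_cases h : l.length ≤ f
    · rw [pvGoFuelSucc old new hold f l h, ih l h]
    · have : l.length = f + 1 := by omega
      simp [PySem.Chars.replace, List.isEmpty_iff, hold, this]

theorem pvRepNil (old new : List Char) (hold : old ≠ []) : PySem.Chars.replace [] old new = [] := by
  simp [PySem.Chars.replace, PySem.Chars.replace.go, List.isEmpty_iff, hold]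

theorem pvRepMatch (old new : List Char) (c : Char) (t : List Char) (hold : old ≠ [])
    (h : old.isPrefixOf (c :: t) = true) :
    PySem.Chars.replace (c :: t) old new
      = new ++ PySem.Chars.replace (List.drop old.length (c :: t)) old new := by
  have hlen : 1 ≤ old.length := by
    cases old with
    | nil => exact absurd rfl hold
    | cons a b => simp
  rw [PySem.Chars.replace]
  simp only [List.isEmpty_iff, hold, if_false, List.length_cons]
  conv_lhs => rw [show PySem.Chars.replace.go old new (t.length + 1) (c :: t) [] =
    PySem.Chars.replace.go old new t.length (List.drop old.length (c :: t)) (new.reverse ++ []) from by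
      simp [PySem.Chars.replace.go, h]]
  rw [pvGoAcc]
  rw [pvGoFuelGe old new hold t.length _ (by simp; omega)]
  simp

theorem pvRepNomatch (old new : List Char) (c : Char) (t : List Char) (hold : old ≠ [])
    (h : ¬ old.isPrefixOf (c :: t) = true) :
    PySem.Chars.replace (c :: t) old new = c :: PySem.Chars.replace t old new := by
  have : ¬ (old.isEmpty = true) := by simp [List.isEmpty_iff, hold]
  rw [PySem.Chars.replace, if_neg this]
  simp only [List.length_cons]
  conv_lhs => rw [show PySem.Chars.replace.go old new (t.length + 1) (c :: t) [] =
    PySem.Chars.replace.go old new t.length t ([c] ++ []) from by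
      simp [PySem.Chars.replace.go, h]]
  rw [pvGoAcc]
  rw [pvGoFuelGe old new hold t.length t le_rfl]
  simp [PySem.Chars.replace, this]

def pvRif (a b c : Char) : Char := if c = a then b else c
def pvSub1 (c : Char) : Char :=
  pvRif ',' '、' (pvRif ']' '］' (pvRif '[' '［' (pvRif ')' '）' (pvRif '(' '（' (pvRif '}' '｝' (pvRif '{' '｛' c))))))
def pvSub2 (c : Char) : Char :=
  pvRif '?' '？' (pvRif '!' '！' (pvRif ':' '：' (pvRif '~' '〜' (pvRif ' ' '　' c))))
def pvR3 (l : List Char) : List Char := PySem.Chars.replace l ['.', '.', '.'] ['…']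
def pvR2 (l : List Char) : List Char := PySem.Chars.replace l ['.', '.'] ['‥']
def pvR1 (l : List Char) : List Char := PySem.Chars.replace l ['.'] ['。']

theorem pvRepSingle (a b : Char) (l : List Char) :
    PySem.Chars.replace l [a] [b] = l.map (pvRif a b) := by
  induction l with
  | nil => exact pvRepNil [a] [b] (by simp)
  | cons c t ih =>
    by_cases hc : c = a
    · subst hc
      rw [pvRepMatch [c] [b] c t (by simp) (by simp [List.isPrefixOf])]
      simp [pvRif, ih]
    · rw [pvRepNomatch [a] [b] c t (by simp) (by simp [List.isPrefixOf]; exact fun h => hc h.symm)]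
      simp [pvRif, hc, ih]

theorem pvRif_eq_iff (a b c x : Char) (ha : a ≠ x) (hb : b ≠ x) : pvRif a b c = x ↔ c = x := by
  unfold pvRif
  split_ifs with h
  · rw [h]; exact iff_of_false hb ha
  · exact Iff.rfl

theorem pvSub1_eq_iff (c x : Char) (hx : x = '.' ∨ x = '\'' ∨ x = '"') : pvSub1 c = x ↔ c = x := by
  have h1 : (',' : Char) ≠ x ∧ ('、' : Char) ≠ x ∧ (']' : Char) ≠ x ∧ ('］' : Char) ≠ x ∧
      ('[' : Char) ≠ x ∧ ('［' : Char) ≠ x ∧ (')' : Char) ≠ x ∧ ('）' : Char) ≠ x ∧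
      ('(' : Char) ≠ x ∧ ('（' : Char) ≠ x ∧ ('}' : Char) ≠ x ∧ ('｝' : Char) ≠ x ∧
      ('{' : Char) ≠ x ∧ ('｛' : Char) ≠ x := by
    rcases hx with h | h | h <;> subst h <;> refine ⟨?_,?_,?_,?_,?_,?_,?_,?_,?_,?_,?_,?_,?_,?_⟩ <;> decide
  obtain ⟨a1,a2,a3,a4,a5,a6,a7,a8,a9,a10,a11,a12,a13,a14⟩ := h1
  unfold pvSub1
  rw [pvRif_eq_iff _ _ _ _ a1 a2, pvRif_eq_iff _ _ _ _ a3 a4, pvRif_eq_iff _ _ _ _ a5 a6,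
      pvRif_eq_iff _ _ _ _ a7 a8, pvRif_eq_iff _ _ _ _ a9 a10, pvRif_eq_iff _ _ _ _ a11 a12,
      pvRif_eq_iff _ _ _ _ a13 a14]

theorem pvSub2_eq_iff (c x : Char) (hx : x = '.' ∨ x = '\'' ∨ x = '"') : pvSub2 c = x ↔ c = x := by
  have h1 : ('?' : Char) ≠ x ∧ ('？' : Char) ≠ x ∧ ('!' : Char) ≠ x ∧ ('！' : Char) ≠ x ∧
      (':' : Char) ≠ x ∧ ('：' : Char) ≠ x ∧ ('~' : Char) ≠ x ∧ ('〜' : Char) ≠ x ∧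
      (' ' : Char) ≠ x ∧ ('　' : Char) ≠ x := by
    rcases hx with h | h | h <;> subst h <;> refine ⟨?_,?_,?_,?_,?_,?_,?_,?_,?_,?_⟩ <;> decide
  obtain ⟨a1,a2,a3,a4,a5,a6,a7,a8,a9,a10⟩ := h1
  unfold pvSub2
  rw [pvRif_eq_iff _ _ _ _ a1 a2, pvRif_eq_iff _ _ _ _ a3 a4, pvRif_eq_iff _ _ _ _ a5 a6,
      pvRif_eq_iff _ _ _ _ a7 a8, pvRif_eq_iff _ _ _ _ a9 a10]

theorem pvRif_of_ne (a b c : Char) (h : c ≠ a) : pvRif a b c = c := by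
  unfold pvRif; rw [if_neg h]

theorem pvSubCompose (c : Char) : pvSub2 (pvSub1 c) = pvLookup c := by
  by_cases h1 : c = '{';  · subst h1; decide
  by_cases h2 : c = '}';  · subst h2; decide
  by_cases h3 : c = '(';  · subst h3; decide
  by_cases h4 : c = ')';  · subst h4; decide
  by_cases h5 : c = '[';  · subst h5; decide
  by_cases h6 : c = ']';  · subst h6; decide
  by_cases h7 : c = ',';  · subst h7; decide
  by_cases h8 : c = ' ';  · subst h8; decide
  by_cases h9 : c = '~';  · subst h9; decide
  by_cases h10 : c = ':'; · subst h10; decide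
  by_cases h11 : c = '!'; · subst h11; decide
  by_cases h12 : c = '?'; · subst h12; decide
  have e1 : pvSub1 c = c := by
    unfold pvSub1
    rw [pvRif_of_ne _ _ _ h1, pvRif_of_ne _ _ _ h2, pvRif_of_ne _ _ _ h3, pvRif_of_ne _ _ _ h4,
        pvRif_of_ne _ _ _ h5, pvRif_of_ne _ _ _ h6, pvRif_of_ne _ _ _ h7]
  have e2 : pvSub2 c = c := by
    unfold pvSub2
    rw [pvRif_of_ne _ _ _ h8, pvRif_of_ne _ _ _ h9, pvRif_of_ne _ _ _ h10,
        pvRif_of_ne _ _ _ h11, pvRif_of_ne _ _ _ h12]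
  rw [e1, e2]
  simp [pvLookup, pvTable, List.find?_cons_of_neg, List.find?_nil, beq_iff_eq, h1, h2, h3, h4, h5, h6, h7, h8, h9, h10, h11, h12]

theorem pvR3_nil : pvR3 [] = [] := pvRepNil _ _ (by simp)
theorem pvR2_nil : pvR2 [] = [] := pvRepNil _ _ (by simp)
theorem pvR1_nil : pvR1 [] = [] := pvRepNil _ _ (by simp)

theorem pvR3_cons_ne (c : Char) (t : List Char) (hc : c ≠ '.') : pvR3 (c :: t) = c :: pvR3 t := by
  unfold pvR3
  exact pvRepNomatch _ _ _ _ (by simp) (by simp [List.isPrefixOf, beq_iff_eq, hc, Ne.symm hc])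
theorem pvR2_cons_ne (c : Char) (t : List Char) (hc : c ≠ '.') : pvR2 (c :: t) = c :: pvR2 t := by
  unfold pvR2
  exact pvRepNomatch _ _ _ _ (by simp) (by simp [List.isPrefixOf, beq_iff_eq, hc, Ne.symm hc])
theorem pvR1_cons_ne (c : Char) (t : List Char) (hc : c ≠ '.') : pvR1 (c :: t) = c :: pvR1 t := by
  unfold pvR1
  exact pvRepNomatch _ _ _ _ (by simp) (by simp [List.isPrefixOf, beq_iff_eq, hc, Ne.symm hc])

theorem pvR3_dots3 (X : List Char) : pvR3 ('.' :: '.' :: '.' :: X) = '…' :: pvR3 X := by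
  unfold pvR3
  rw [pvRepMatch _ _ _ _ (by simp) (by simp [List.isPrefixOf])]
  simp

theorem pvR2_dots2 (X : List Char) : pvR2 ('.' :: '.' :: X) = '‥' :: pvR2 X := by
  unfold pvR2
  rw [pvRepMatch _ _ _ _ (by simp) (by simp [List.isPrefixOf])]
  simp

theorem pvR1_dot (X : List Char) : pvR1 ('.' :: X) = '。' :: pvR1 X := by
  unfold pvR1
  rw [pvRepMatch _ _ _ _ (by simp) (by simp [List.isPrefixOf])]
  simp

theorem pvR3_dots2 (X : List Char) (h : X.head? ≠ some '.') :
    pvR3 ('.' :: '.' :: X) = '.' :: '.' :: pvR3 X := by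
  cases X with
  | nil => rw [pvR3_nil]; decide
  | cons y ys =>
    have hy : y ≠ '.' := by simpa using h
    unfold pvR3
    rw [pvRepNomatch _ _ _ _ (by simp) (by simp [List.isPrefixOf, beq_iff_eq, hy, Ne.symm hy])]
    rw [pvRepNomatch _ _ _ _ (by simp) (by simp [List.isPrefixOf, beq_iff_eq, hy, Ne.symm hy])]

theorem pvR3_dots1 (X : List Char) (h : X.head? ≠ some '.') :
    pvR3 ('.' :: X) = '.' :: pvR3 X := by
  cases X with
  | nil => rw [pvR3_nil]; decide
  | cons y ys =>
    have hy : y ≠ '.' := by simpa using h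
    unfold pvR3
    rw [pvRepNomatch _ _ _ _ (by simp) (by simp [List.isPrefixOf, beq_iff_eq, hy, Ne.symm hy])]

theorem pvR2_dots1 (X : List Char) (h : X.head? ≠ some '.') :
    pvR2 ('.' :: X) = '.' :: pvR2 X := by
  cases X with
  | nil => rw [pvR2_nil]; decide
  | cons y ys =>
    have hy : y ≠ '.' := by simpa using h
    unfold pvR2
    rw [pvRepNomatch _ _ _ _ (by simp) (by simp [List.isPrefixOf, beq_iff_eq, hy, Ne.symm hy])]

theorem pvR3_head (X : List Char) (h : X.head? ≠ some '.') : (pvR3 X).head? ≠ some '.' := by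
  cases X with
  | nil => rw [pvR3_nil]; simp
  | cons y ys =>
    have hy : y ≠ '.' := by simpa using h
    rw [pvR3_cons_ne y ys hy]; simpa using hy

theorem pvMapSub1_head (X : List Char) (h : X.head? ≠ some '.') :
    (X.map pvSub1).head? ≠ some '.' := by
  cases X with
  | nil => simp
  | cons y ys =>
    have hy : y ≠ '.' := by simpa using h
    simp only [List.map_cons, List.head?_cons, ne_eq, Option.some.injEq]
    intro h'
    exact hy ((pvSub1_eq_iff y '.' (Or.inl rfl)).mp h')

theorem pvALoop_cons_ne (s d : Bool) (c : Char) (t : List Char) (h1 : c ≠ '\'') (h2 : c ≠ '"') :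
    pvALoop s d (c :: t) = c :: pvALoop s d t := by
  simp [pvALoop, h1, h2]

theorem pvALoop_squote (s d : Bool) (t : List Char) :
    pvALoop s d ('\'' :: t) = (if s then '「' else '」') :: pvALoop (!s) d t := by
  simp [pvALoop]
theorem pvALoop_dquote (s d : Bool) (t : List Char) :
    pvALoop s d ('"' :: t) = (if d then '『' else '』') :: pvALoop s (!d) t := by
  simp [pvALoop]

theorem pvBLoop_nil (s d : Bool) : pvBLoop s d [] = [] := by simp [pvBLoop]
theorem pvBLoop_dots3 (s d : Bool) (r : List Char) :
    pvBLoop s d ('.' :: '.' :: '.' :: r) = '…' :: pvBLoop s d r := by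
  rw [pvBLoop]; simp
theorem pvBLoop_dots2 (s d : Bool) (X : List Char) (h : X.head? ≠ some '.') :
    pvBLoop s d ('.' :: '.' :: X) = '‥' :: pvBLoop s d X := by
  rw [pvBLoop]; cases X <;> simp_all
theorem pvBLoop_dot1 (s d : Bool) (X : List Char) (h : X.head? ≠ some '.') :
    pvBLoop s d ('.' :: X) = '。' :: pvBLoop s d X := by
  rw [pvBLoop]; cases X <;> simp_all
theorem pvBLoop_squote (s d : Bool) (t : List Char) :
    pvBLoop s d ('\'' :: t) = (if s then '「' else '」') :: pvBLoop (!s) d t := by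
  rw [pvBLoop]; simp
theorem pvBLoop_dquote (s d : Bool) (t : List Char) :
    pvBLoop s d ('"' :: t) = (if d then '『' else '』') :: pvBLoop s (!d) t := by
  rw [pvBLoop]; simp
theorem pvBLoop_other (s d : Bool) (c : Char) (t : List Char)
    (h1 : c ≠ '.') (h2 : c ≠ '\'') (h3 : c ≠ '"') :
    pvBLoop s d (c :: t) = pvLookup c :: pvBLoop s d t := by
  rw [pvBLoop]; simp [h1, h2, h3]

theorem pvMain : ∀ (n : Nat) (l : List Char), l.length ≤ n → ∀ (s d : Bool),
    pvALoop s d ((pvR1 (pvR2 (pvR3 (l.map pvSub1)))).map pvSub2) = pvBLoop s d l := by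
  intro n
  induction n with
  | zero =>
    intro l hl s d
    have : l = [] := List.length_eq_zero_iff.mp (Nat.le_zero.mp hl)
    subst this
    simp [pvR3_nil, pvR2_nil, pvR1_nil, pvALoop, pvBLoop_nil]
  | succ m ih =>
    intro l hl s d
    cases l with
    | nil => simp [pvR3_nil, pvR2_nil, pvR1_nil, pvALoop, pvBLoop_nil]
    | cons c rest =>
      by_cases hc : c = '.'
      · subst hc
        cases rest with
        | nil =>
          rw [List.map_cons, List.map_nil, (show pvSub1 '.' = '.' by decide)]
          rw [pvR3_dots1 [] (by simp), pvR3_nil, pvR2_dots1 [] (by simp), pvR2_nil,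
              pvR1_dot, pvR1_nil]
          rw [List.map_cons, List.map_nil, (show pvSub2 '。' = '。' by decide)]
          rw [pvALoop_cons_ne s d _ _ (by decide) (by decide)]
          rw [pvBLoop_dot1 s d [] (by simp), pvBLoop_nil]
          simp [pvALoop]
        | cons c2 r2 =>
          by_cases hc2 : c2 = '.'
          · subst hc2
            cases r2 with
            | nil =>
              rw [List.map_cons, List.map_cons, List.map_nil, (show pvSub1 '.' = '.' by decide)]
              rw [pvR3_dots2 [] (by simp), pvR3_nil, pvR2_dots2, pvR2_nil,
                  pvR1_cons_ne _ _ (by decide), pvR1_nil]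
              rw [List.map_cons, List.map_nil, (show pvSub2 '‥' = '‥' by decide)]
              rw [pvALoop_cons_ne s d _ _ (by decide) (by decide)]
              rw [pvBLoop_dots2 s d [] (by simp), pvBLoop_nil]
              simp [pvALoop]
            | cons c3 r3 =>
              by_cases hc3 : c3 = '.'
              · subst hc3
                have hr : r3.length ≤ m := by simp at hl; omega
                rw [List.map_cons, List.map_cons, List.map_cons,
                    (show pvSub1 '.' = '.' by decide)]
                rw [pvR3_dots3, pvR2_cons_ne _ _ (by decide), pvR1_cons_ne _ _ (by decide)]
                rw [List.map_cons, (show pvSub2 '…' = '…' by decide)]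
                rw [pvALoop_cons_ne s d _ _ (by decide) (by decide)]
                rw [ih r3 hr s d, pvBLoop_dots3]
              · have hX : (c3 :: r3).head? ≠ some '.' := by simpa using hc3
                have hX1 : ((c3 :: r3).map pvSub1).head? ≠ some '.' := pvMapSub1_head _ hX
                have hr : (c3 :: r3).length ≤ m := by simp at hl ⊢; omega
                rw [List.map_cons, List.map_cons, (show pvSub1 '.' = '.' by decide)]
                rw [pvR3_dots2 _ hX1, pvR2_dots2, pvR1_cons_ne _ _ (by decide)]
                rw [List.map_cons, (show pvSub2 '‥' = '‥' by decide)]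
                rw [pvALoop_cons_ne s d _ _ (by decide) (by decide)]
                rw [ih _ hr s d, pvBLoop_dots2 s d _ hX]
          · have hX : (c2 :: r2).head? ≠ some '.' := by simpa using hc2
            have hX1 : ((c2 :: r2).map pvSub1).head? ≠ some '.' := pvMapSub1_head _ hX
            have hX3 : (pvR3 ((c2 :: r2).map pvSub1)).head? ≠ some '.' := pvR3_head _ hX1
            have hr : (c2 :: r2).length ≤ m := by simp at hl ⊢; omega
            rw [List.map_cons, (show pvSub1 '.' = '.' by decide)]
            rw [pvR3_dots1 _ hX1, pvR2_dots1 _ hX3, pvR1_dot]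
            rw [List.map_cons, (show pvSub2 '。' = '。' by decide)]
            rw [pvALoop_cons_ne s d _ _ (by decide) (by decide)]
            rw [ih _ hr s d, pvBLoop_dot1 s d _ hX]
      · have hr : rest.length ≤ m := by simp at hl; omega
        by_cases hq1 : c = '\''
        · subst hq1
          rw [List.map_cons, (show pvSub1 '\'' = '\'' by decide)]
          rw [pvR3_cons_ne _ _ (by decide), pvR2_cons_ne _ _ (by decide),
              pvR1_cons_ne _ _ (by decide)]
          rw [List.map_cons, (show pvSub2 '\'' = '\'' by decide)]
          rw [pvALoop_squote, ih _ hr, pvBLoop_squote]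
        · by_cases hq2 : c = '"'
          · subst hq2
            rw [List.map_cons, (show pvSub1 '"' = '"' by decide)]
            rw [pvR3_cons_ne _ _ (by decide), pvR2_cons_ne _ _ (by decide),
                pvR1_cons_ne _ _ (by decide)]
            rw [List.map_cons, (show pvSub2 '"' = '"' by decide)]
            rw [pvALoop_dquote, ih _ hr, pvBLoop_dquote]
          · have hd : pvSub1 c ≠ '.' := fun h => hc ((pvSub1_eq_iff c '.' (Or.inl rfl)).mp h)
            have hq1' : pvSub2 (pvSub1 c) ≠ '\'' := fun h =>
              hq1 ((pvSub1_eq_iff c '\'' (Or.inr (Or.inl rfl))).mp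
                ((pvSub2_eq_iff _ '\'' (Or.inr (Or.inl rfl))).mp h))
            have hq2' : pvSub2 (pvSub1 c) ≠ '"' := fun h =>
              hq2 ((pvSub1_eq_iff c '"' (Or.inr (Or.inr rfl))).mp
                ((pvSub2_eq_iff _ '"' (Or.inr (Or.inr rfl))).mp h))
            rw [List.map_cons]
            rw [pvR3_cons_ne _ _ hd, pvR2_cons_ne _ _ hd, pvR1_cons_ne _ _ hd]
            rw [List.map_cons]
            rw [pvALoop_cons_ne s d _ _ hq1' hq2']
            rw [pvSubCompose c, ih _ hr, pvBLoop_other s d c rest hc hq1 hq2]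

theorem pvComp2 : (pvRif '?' '？' ∘ pvRif '!' '！' ∘ pvRif ':' '：' ∘ pvRif '~' '〜' ∘ pvRif ' ' '　') = pvSub2 := by
  funext x; simp only [Function.comp_apply, pvSub1, pvSub2]
theorem pvComp1 : (pvRif ',' '、' ∘ pvRif ']' '］' ∘ pvRif '[' '［' ∘ pvRif ')' '）' ∘ pvRif '(' '（' ∘ pvRif '}' '｝' ∘ pvRif '{' '｛') = pvSub1 := by
  funext x; simp only [Function.comp_apply, pvSub1, pvSub2]

set_option maxHeartbeats 1600000 in
theorem pvAChar (sentence : String) :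
    replace_punctuations sentence
      = String.ofList (pvALoop true true ((pvR1 (pvR2 (pvR3 (sentence.toList.map pvSub1)))).map pvSub2)) := by
  unfold replace_punctuations
  simp only [PySem.Str.toList_replace]
  rw [show ("{" : String).toList = ['{'] from rfl, show ("｛" : String).toList = ['｛'] from rfl,
      show ("}" : String).toList = ['}'] from rfl, show ("｝" : String).toList = ['｝'] from rfl,
      show ("(" : String).toList = ['('] from rfl, show ("（" : String).toList = ['（'] from rfl,
      show (")" : String).toList = [')'] from rfl, show ("）" : String).toList = ['）'] from rfl,
      show ("[" : String).toList = ['['] from rfl, show ("［" : String).toList = ['［'] from rfl,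
      show ("]" : String).toList = [']'] from rfl, show ("］" : String).toList = ['］'] from rfl,
      show ("," : String).toList = [','] from rfl, show ("、" : String).toList = ['、'] from rfl,
      show ("..." : String).toList = ['.','.','.'] from rfl, show ("…" : String).toList = ['…'] from rfl,
      show (".." : String).toList = ['.','.'] from rfl, show ("‥" : String).toList = ['‥'] from rfl,
      show ("." : String).toList = ['.'] from rfl, show ("。" : String).toList = ['。'] from rfl,
      show (" " : String).toList = [' '] from rfl, show ("　" : String).toList = ['　'] from rfl,
      show ("~" : String).toList = ['~'] from rfl, show ("〜" : String).toList = ['〜'] from rfl,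
      show (":" : String).toList = [':'] from rfl, show ("：" : String).toList = ['：'] from rfl,
      show ("!" : String).toList = ['!'] from rfl, show ("！" : String).toList = ['！'] from rfl,
      show ("?" : String).toList = ['?'] from rfl, show ("？" : String).toList = ['？'] from rfl]
  rw [pvRepSingle '{' '｛', pvRepSingle '}' '｝', pvRepSingle '(' '（', pvRepSingle ')' '）',
      pvRepSingle '[' '［', pvRepSingle ']' '］', pvRepSingle ',' '、',
      pvRepSingle ' ' '　', pvRepSingle '~' '〜', pvRepSingle ':' '：',
      pvRepSingle '!' '！', pvRepSingle '?' '？']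
  simp only [List.map_map]
  refine congrArg String.ofList ?_
  refine congrArg (pvALoop true true) ?_
  rw [pvR1, pvR2, pvR3]
  rw [pvComp2, pvComp1]

-- ===== VERDICT (by name: the statement is the Claim_ definition above) =====
theorem replace_punctuations_spec : Claim_equal_replace_punctuations := by
  intro sentence _
  unfold Spec_replace_punctuations replace_punctuations_alt
  rw [pvAChar, pvMain sentence.toList.length sentence.toList le_rfl true true]
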